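-- pv_equiv track=rewrite | github.com/Coffe818/BFOA | MisMetodos.py | calcular_puntuacion_columna
-- ===== SOURCE A (Python) =====
-- from collections import Counter
-- import string
--
-- def calcular_puntuacion_columna(lista):
--     letras = [letra for letra in lista if letra in string.ascii_letters]
--     conteo_letras = Counter(letras)
--     max_conteo = max(conteo_letras.values(), default=0)
--     puntuacion =(max_conteo - 1) ** 2
--     if max_conteo == 1 or max_conteo==0:
--         return 0
--     return puntuacion
-- ===== SOURCE B (Python) =====
-- import string
--
-- def calcular_puntuacion_columna(lista):
--     letras = sorted(x for x in lista if x in string.ascii_letters)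
--     best = 0
--     run = 0
--     prev = None
--     for x in letras:
--         run = run + 1 if x == prev else 1
--         prev = x
--         if run > best:
--             best = run
--     return (best - 1) ** 2 if best > 1 else 0
-- ===== Notes on version B (the rewrite author's own statement) =====
-- stated objective: alternative
-- what changed: Replaces A's Counter hash-multiset plus max over its values by sorting the filtered letters and a single linear scan that tracks the current and maximal run length of equal consecutive elements, then applies the same closed form.
import Mathlib
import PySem

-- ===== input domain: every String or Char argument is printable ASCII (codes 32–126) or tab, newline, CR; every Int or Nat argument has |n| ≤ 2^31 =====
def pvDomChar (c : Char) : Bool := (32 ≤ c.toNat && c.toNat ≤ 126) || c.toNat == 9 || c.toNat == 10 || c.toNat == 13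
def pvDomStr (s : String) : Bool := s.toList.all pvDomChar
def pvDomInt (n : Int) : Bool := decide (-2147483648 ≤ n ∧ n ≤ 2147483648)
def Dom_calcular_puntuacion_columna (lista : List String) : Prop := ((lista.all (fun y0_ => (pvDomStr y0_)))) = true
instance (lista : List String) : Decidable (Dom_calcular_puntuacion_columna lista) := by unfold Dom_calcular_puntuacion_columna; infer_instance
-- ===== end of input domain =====

-- B replaces A's Counter-then-max by sort-then-single-scan of run lengths (alternative algorithm, same closed form at the end).

-- string.ascii_letters
def pvAsciiLetters : String := "abcdefghijklmnopqrstuvwxyzABCDEFGHIJKLMNOPQRSTUVWXYZ"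

-- ===== PORT A =====
def calcular_puntuacion_columna (lista : List String) : Int :=
  let letras := lista.filter (fun letra => PySem.Str.isIn letra pvAsciiLetters)
  let conteo_letras := PySem.Dict.counter letras
  let max_conteo := PySem.List.maxD conteo_letras.values (fun v => v) 0
  let puntuacion := (max_conteo - 1) ^ 2
  if max_conteo == 1 || max_conteo == 0 then 0 else puntuacion

-- ===== PORT B =====
-- one step of Source B's loop body over the state (best, run, prev)
def pvScanStep (st : Int × Int × Option String) (x : String) : Int × Int × Option String :=
  let run := if some x = st.2.2 then st.2.1 + 1 else 1
  let best := if run > st.1 then run else st.1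
  (best, run, some x)

def calcular_puntuacion_columna_alt (lista : List String) : Int :=
  let letras := PySem.List.sorted (lista.filter (fun x => PySem.Str.isIn x pvAsciiLetters)) (fun x => x) false
  let st := letras.foldl pvScanStep (0, 0, none)
  let best := st.1
  if best > 1 then (best - 1) ^ 2 else 0

-- ===== PRECONDITION & SPEC =====
def Spec_calcular_puntuacion_columna (lista : List String) (out : Int) : Prop := out = calcular_puntuacion_columna_alt lista
instance (lista : List String) (out : Int) : Decidable (Spec_calcular_puntuacion_columna lista out) := by unfold Spec_calcular_puntuacion_columna; infer_instance

-- ===== CLAIM (what is proved, stated in full; the proofs are below) =====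
def Claim_equal_calcular_puntuacion_columna : Prop := ∀ (lista : List String), Dom_calcular_puntuacion_columna lista → Spec_calcular_puntuacion_columna lista (calcular_puntuacion_columna lista)

-- ===== LEMMAS AND PROOFS =====

-- the largest multiplicity of an element of l (0 for [])
def pvMaxCount (l : List String) : Int :=
  ((PySem.Set.ofList l).map (fun v => (l.count v : Int))).foldl max 0

lemma pv_foldl_max_max (l : List Int) : ∀ a b : Int, l.foldl max (max a b) = max a (l.foldl max b) := by
  induction l with
  | nil => intro a b; rfl
  | cons x t ih =>
    intro a b
    simp only [List.foldl_cons, max_assoc]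
    exact ih a (max b x)

lemma pv_count_le_maxCount (l : List String) (v : String) (hv : v ∈ l) :
    (l.count v : Int) ≤ pvMaxCount l := by
  have hmem : (l.count v : Int) ∈ (PySem.Set.ofList l).map (fun v => (l.count v : Int)) :=
    List.mem_map_of_mem ((PySem.Set.mem_ofList l v).mpr hv)
  exact (PySem.List.le_foldl_max _ 0).2 _ hmem

lemma pv_maxCount_nonneg (l : List String) : 0 ≤ pvMaxCount l :=
  (PySem.List.le_foldl_max _ 0).1

lemma pv_one_le_maxCount (l : List String) (v : String) (hv : v ∈ l) : 1 ≤ pvMaxCount l := by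
  have := pv_count_le_maxCount l v hv
  have hc : 1 ≤ l.count v := List.one_le_count_iff.mpr hv
  omega

lemma pv_discard_of_not_mem (s : List String) (p : String) (h : p ∉ s) :
    PySem.Set.discard s p = s := by
  simp only [PySem.Set.discard]
  apply List.filter_eq_self.mpr
  intro a ha
  simp only [Bool.not_eq_eq_eq_not, Bool.not_true, beq_eq_false_iff_ne, ne_eq]
  exact fun hap => h (hap ▸ ha)

lemma pv_ofList_replicate_append (r : Nat) (p : String) (m : List String)
    (hr : 1 ≤ r) (hp : p ∉ m) :
    PySem.Set.ofList (List.replicate r p ++ m) = p :: PySem.Set.ofList m := by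
  induction r with
  | zero => omega
  | succ n ih =>
    by_cases hn : 1 ≤ n
    · have : List.replicate (n+1) p ++ m = p :: (List.replicate n p ++ m) := by
        simp [List.replicate_succ]
      rw [this, PySem.Set.ofList_cons, ih hn]
      have hstep : PySem.Set.discard (p :: PySem.Set.ofList m) p = PySem.Set.discard (PySem.Set.ofList m) p := by
        simp [PySem.Set.discard]
      rw [hstep, pv_discard_of_not_mem _ _ (fun h => hp ((PySem.Set.mem_ofList m p).mp h))]
    · have hn0 : n = 0 := by omega
      subst hn0
      have h1 : List.replicate (0 + 1) p ++ m = p :: m := by simp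
      rw [h1, PySem.Set.ofList_cons, pv_discard_of_not_mem]
      intro hmem
      exact hp ((PySem.Set.mem_ofList m p).mp hmem)

lemma pv_maxCount_replicate_append (r : Nat) (p : String) (m : List String)
    (hr : 1 ≤ r) (hp : p ∉ m) :
    pvMaxCount (List.replicate r p ++ m) = max (r : Int) (pvMaxCount m) := by
  unfold pvMaxCount
  rw [pv_ofList_replicate_append r p m hr hp]
  have hcp : (List.replicate r p ++ m).count p = r := by
    rw [List.count_append, List.count_replicate]
    simp [List.count_eq_zero.mpr hp]
  have hrest : (PySem.Set.ofList m).map (fun v => ((List.replicate r p ++ m).count v : Int))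
      = (PySem.Set.ofList m).map (fun v => (m.count v : Int)) := by
    apply List.map_congr_left
    intro a ha
    have ham : a ∈ m := (PySem.Set.mem_ofList m a).mp ha
    have hap : a ≠ p := fun h => hp (h ▸ ham)
    rw [List.count_append, List.count_replicate]
    simp [Ne.symm hap]
  simp only [List.map_cons, hcp, hrest, List.foldl_cons]
  have h0 : max (0 : Int) (r : Int) = max (r : Int) 0 := max_comm _ _
  rw [h0, pv_foldl_max_max]

lemma pv_maxCount_perm (l l' : List String) (h : l.Perm l') : pvMaxCount l = pvMaxCount l' := by
  have hle : ∀ (a b : List String), a.Perm b → pvMaxCount a ≤ pvMaxCount b := by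
    intro a b hab
    rcases PySem.List.foldl_max_mem ((PySem.Set.ofList a).map (fun v => (a.count v : Int))) 0 with h0 | hm
    · unfold pvMaxCount; rw [h0]; exact pv_maxCount_nonneg b
    · unfold pvMaxCount
      rcases List.mem_map.mp hm with ⟨v, hv, hveq⟩
      rw [← hveq, hab.count_eq]
      exact pv_count_le_maxCount b v (hab.mem_iff.mp ((PySem.Set.mem_ofList a v).mp hv))
  exact le_antisymm (hle l l' h) (hle l' l h.symm)

lemma pv_scanStep_self (b r : Int) (p : String) :
    pvScanStep (b, r, some p) p = (max b (r + 1), r + 1, some p) := by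
  simp only [pvScanStep]
  rw [max_def]
  split_ifs <;> simp_all <;> omega

lemma pv_scanStep_ne (b r : Int) (p x : String) (h : x ≠ p) :
    pvScanStep (b, r, some p) x = (max b 1, 1, some x) := by
  simp only [pvScanStep]
  rw [max_def]
  split_ifs <;> simp_all <;> omega

lemma pv_scan_invariant (l : List String) : ∀ (r : Nat) (p : String) (b : Int),
    1 ≤ r → (r : Int) ≤ b → (List.replicate r p ++ l).Pairwise (· ≤ ·) →
    (l.foldl pvScanStep (b, (r : Int), some p)).1 = max b (pvMaxCount (List.replicate r p ++ l)) := by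
  induction l with
  | nil =>
    intro r p b hr hrb _
    simp only [List.foldl_nil]
    rw [pv_maxCount_replicate_append r p [] hr (List.not_mem_nil)]
    have h0 : pvMaxCount [] = 0 := rfl
    rw [h0, max_def, max_def]
    split_ifs <;> omega
  | cons x l₂ ih =>
    intro r p b hr hrb hs
    by_cases hx : x = p
    · subst hx
      have hlist : List.replicate r x ++ x :: l₂ = List.replicate (r + 1) x ++ l₂ := by
        rw [List.replicate_succ', List.append_assoc]
        rfl
      rw [List.foldl_cons, pv_scanStep_self, hlist]
      have hcast : ((r : Int) + 1) = ((r + 1 : Nat) : Int) := by push_cast; ring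
      rw [hcast]
      rw [ih (r + 1) x (max b ((r + 1 : Nat) : Int)) (by omega) (le_max_right _ _)
        (hlist ▸ hs)]
      have hcnt : ((r + 1 : Nat) : Int) ≤ pvMaxCount (List.replicate (r + 1) x ++ l₂) := by
        have hmem : x ∈ List.replicate (r + 1) x ++ l₂ := by
          simp [List.mem_append, List.mem_replicate]
        have := pv_count_le_maxCount _ x hmem
        have hge : r + 1 ≤ (List.replicate (r + 1) x ++ l₂).count x := by
          rw [List.count_append, List.count_replicate]
          simp
        omega
      rw [max_def, max_def, max_def]
      split_ifs <;> omega
    · have hp_notin : p ∉ x :: l₂ := by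
        rw [List.pairwise_append] at hs
        obtain ⟨_, h2, hcross⟩ := hs
        have hpmem : p ∈ List.replicate r p := by simp [List.mem_replicate]; omega
        intro hmem
        rcases List.mem_cons.mp hmem with heq | hmem2
        · exact hx heq.symm
        · have hxp : x ≤ p := (List.pairwise_cons.mp h2).1 p hmem2
          have hpx : p ≤ x := hcross p hpmem x (by simp)
          exact hx (le_antisymm hxp hpx)
      rw [List.foldl_cons, pv_scanStep_ne _ _ _ _ hx]
      have hone : (1 : Int) = ((1 : Nat) : Int) := rfl
      have hxs : (List.replicate 1 x ++ l₂).Pairwise (· ≤ ·) := by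
        rw [List.pairwise_append] at hs
        simpa using hs.2.1
      rw [hone, ih 1 x (max b ((1 : Nat) : Int)) (by omega) (by simp) hxs]
      rw [pv_maxCount_replicate_append r p (x :: l₂) hr hp_notin]
      have hC : 1 ≤ pvMaxCount (List.replicate 1 x ++ l₂) :=
        pv_one_le_maxCount _ x (by simp)
      have heq : List.replicate 1 x ++ l₂ = x :: l₂ := by simp
      rw [heq] at hC
      rw [heq]
      simp only [Nat.cast_one]
      rw [max_def, max_def, max_def, max_def]
      split_ifs <;> omega

lemma pv_scan_sorted (s : List String) (hs : s.Pairwise (· ≤ ·)) :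
    (s.foldl pvScanStep (0, 0, none)).1 = pvMaxCount s := by
  cases s with
  | nil => rfl
  | cons x t =>
    have hstep : pvScanStep (0, 0, none) x = (1, 1, some x) := by
      simp [pvScanStep]
    rw [List.foldl_cons, hstep]
    have hone : (1 : Int) = ((1 : Nat) : Int) := rfl
    have hxs : (List.replicate 1 x ++ t).Pairwise (· ≤ ·) := by simpa using hs
    rw [hone, pv_scan_invariant t 1 x ((1 : Nat) : Int) (by omega) (by simp) hxs]
    have heq : List.replicate 1 x ++ t = x :: t := by simp
    rw [heq]
    have hC : 1 ≤ pvMaxCount (x :: t) := pv_one_le_maxCount _ x (by simp)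
    simp only [Nat.cast_one]
    rw [max_def]
    split_ifs <;> omega

lemma pv_maxD_counter (l : List String) :
    PySem.List.maxD (PySem.Dict.counter l).values (fun v => v) 0 = pvMaxCount l := by
  have hvals : (PySem.Dict.counter l).values = (PySem.Set.ofList l).map (fun k => (l.count k : Int)) := by
    simp only [PySem.Dict.values, PySem.Dict.items_counter, List.map_map]
    rfl
  rw [hvals]
  cases hof : (PySem.Set.ofList l).map (fun k => (l.count k : Int)) with
  | nil =>
    unfold pvMaxCount
    rw [hof]
    rfl
  | cons c t =>
    have hc : 0 ≤ c := by
      rcases List.map_eq_cons_iff.mp hof with ⟨v, rest, hsplit, hcv, _⟩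
      simp [← hcv]
    simp only [PySem.List.maxD, PySem.List.max?_id_cons, Option.getD_some]
    unfold pvMaxCount
    rw [hof, List.foldl_cons]
    congr 1
    rw [max_def]
    split_ifs <;> omega

-- ===== VERDICT (by name: the statement is the Claim_ definition above) =====
theorem calcular_puntuacion_columna_spec : Claim_equal_calcular_puntuacion_columna := by
  intro lista _
  unfold Spec_calcular_puntuacion_columna calcular_puntuacion_columna calcular_puntuacion_columna_alt
  set L := lista.filter (fun x => PySem.Str.isIn x pvAsciiLetters) with hL
  set S := PySem.List.sorted L (fun x => x) false with hS
  have hpair : S.Pairwise (· ≤ ·) := by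
    have := PySem.List.sorted_pairwise L (fun x => x)
    simpa using this
  have hscan : (S.foldl pvScanStep (0, 0, none)).1 = pvMaxCount S := pv_scan_sorted S hpair
  have hperm : pvMaxCount S = pvMaxCount L := pv_maxCount_perm S L (PySem.List.sorted_perm L _ _)
  have hA : PySem.List.maxD (PySem.Dict.counter L).values (fun v => v) 0 = pvMaxCount L := pv_maxD_counter L
  simp only [hA, hscan, hperm]
  have hnn : 0 ≤ pvMaxCount L := pv_maxCount_nonneg L
  by_cases h1 : pvMaxCount L = 1
  · simp [h1]
  · by_cases h0 : pvMaxCount L = 0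
    · simp [h0]
    · have h2 : 1 < pvMaxCount L := by omega
      simp [h1, h0, h2]
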